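-- pv_equiv track=rewrite | github.com/wafflesandpancakes19/DSA-Assignments | a4.py | findWildSum
-- ===== SOURCE A (Python) =====
-- def convertStr(p):
-- 	# SPECIFICATION: function converts a given character 'p' to the corresponding number from 0 to 25
-- 	# TIME COMPLEXITY = O(1)
-- 	# SPACE COMPLEXITY: O(1) since it will be less than the constant log(26)
-- 	return (ord(p)-65)
--
-- def findWildcard(p):
-- 	# SPECIFICATION: This function will find and return the index of the wildcard in the given string p
-- 	# TIME COMPLEXITY: the worst case time complexity is O(m), when it has to iterate over the entire string
-- 	# SPACE COMPLEXITY: since the variables m and i are being stored, space complexity will be O(logm)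
-- 	m = len(p)
-- 	i = 0
-- 	while i<m:
-- 		if p[i] == '?':
-- 			return i
-- 		i = i+1
--
-- def findWildSum(t, p, q):
-- 	# SPECIFICATION: This function will find the bijective mapping for the given input string p
-- 	m = len(t)
-- 	i = 0
-- 	sum = 0
-- 	j = findWildcard(t)	#we find the index which has the wildcard
-- 	# The required sum is calculated using iteration
-- 	while i<m:
-- 		if i == j:
-- 			sum = (26*sum)%q	# basic arithmetic operations are being performed, hence, Time complexity is O(log(q))
-- 		else:
-- 			sum = (convertStr(p[i])+1 + 26*sum)%q	# basic arithmetic is being performed, hence time complexity is O(log(q))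
-- 		i = i+1
-- 	# TIME COMPLEXITY: This is a while loop, which will run m times, performing O(logq) operations
-- 	# Therefore, time complexity is O(mlogq)
-- 	# SPACE COMPLEXITY:
-- 	# m, i and sum are being maintained here
-- 	# m and i both will take O(logm) space and sum will take O(logq) space because of modulo q
-- 	# therefore, space complexity can be taken as O(logm+logq)
-- 	return (sum)
-- ===== SOURCE B (Python) =====
-- def findWildSum(t, p, q):
--     # B: explicit weighted sum, iterating indices from the end with a running
--     # power of 26 (kept mod q), instead of A's front-to-back Horner fold.
--     j = None
--     for k, c in enumerate(t):
--         if c == '?':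
--             j = k
--             break
--     acc = 0
--     pw = 1
--     for i in range(len(t) - 1, -1, -1):
--         if i != j:
--             acc = (acc + (ord(p[i]) - 64) * pw) % q
--         pw = (pw * 26) % q
--     return acc
-- ===== Notes on version B (the rewrite author's own statement) =====
-- stated objective: alternative
-- what changed: Replaces A's front-to-back Horner fold (sum = (digit + 26*sum) % q at each step) by a back-to-front explicit weighted sum that maintains a running power of 26 reduced mod q and skips the wildcard index found once up front.
-- outside the precondition, e.g. on findWildSum('', '', 0): A returns 0, B returns 0
import Mathlib
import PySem

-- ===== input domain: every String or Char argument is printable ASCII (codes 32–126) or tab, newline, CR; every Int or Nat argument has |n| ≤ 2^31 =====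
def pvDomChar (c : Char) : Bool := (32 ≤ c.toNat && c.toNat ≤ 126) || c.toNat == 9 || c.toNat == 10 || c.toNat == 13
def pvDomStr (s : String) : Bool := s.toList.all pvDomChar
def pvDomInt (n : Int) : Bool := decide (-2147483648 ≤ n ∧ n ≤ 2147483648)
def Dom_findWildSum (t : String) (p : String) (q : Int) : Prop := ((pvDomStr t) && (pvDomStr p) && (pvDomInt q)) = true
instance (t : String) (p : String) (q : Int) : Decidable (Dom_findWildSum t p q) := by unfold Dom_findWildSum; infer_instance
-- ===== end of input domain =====

-- B replaces A's front-to-back Horner fold by a back-to-front weighted sum with a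
-- running power of 26 kept mod q (objective: alternative decomposition, same cost).

-- ===== PORT A =====
def convertStr (c : Char) : Int := (c.toNat : Int) - 65

-- A's while-loop in findWildcard; p[i] is in range whenever i < m = len(p),
-- so List.getD is exact here.
def findWildcardLoop (pl : List Char) (m i : Nat) : Option Nat :=
  if _h : i < m then
    if pl.getD i 'A' = '?' then some i else findWildcardLoop pl m (i + 1)
  else none
termination_by m - i

def findWildcard (pl : List Char) : Option Nat := findWildcardLoop pl pl.length 0

-- A's main while-loop; p[i] raises IndexError when i ≥ len(p), which Pre_ excludes,
-- so List.getD (default 'A') is exact on Pre_.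
def sumLoopA (pl : List Char) (q : Int) (j : Option Nat) (m i : Nat) (s : Int) : Int :=
  if _h : i < m then
    if some i = j then sumLoopA pl q j m (i + 1) (PySem.Int.mod (26 * s) q)
    else sumLoopA pl q j m (i + 1) (PySem.Int.mod (convertStr (pl.getD i 'A') + 1 + 26 * s) q)
  else s
termination_by m - i

def findWildSum (t : String) (p : String) (q : Int) : Int :=
  sumLoopA p.toList q (findWildcard t.toList) t.toList.length 0 0

-- ===== PORT B =====
-- B's `for k, c in enumerate(t): if c == '?': j = k; break`.
def wildIdx : List Char → Nat → Option Nat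
  | [], _ => none
  | c :: rest, k => if c = '?' then some k else wildIdx rest (k + 1)

-- B's descending loop `for i in range(m-1, -1, -1)`: argument n+1 means the
-- current index is n; getD is exact on Pre_ (see above).
def sumLoopB (pl : List Char) (q : Int) (j : Option Nat) : Nat → Int → Int → Int
  | 0, acc, _ => acc
  | n + 1, acc, pw =>
    sumLoopB pl q j n
      (if some n = j then acc
       else PySem.Int.mod (acc + (((pl.getD n 'A').toNat : Int) - 64) * pw) q)
      (PySem.Int.mod (pw * 26) q)

def findWildSum_alt (t : String) (p : String) (q : Int) : Int :=
  sumLoopB p.toList q (wildIdx t.toList 0) t.toList.length 0 1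

-- ===== PRECONDITION & SPEC =====
-- Pre_ excludes exactly the inputs where A raises: q = 0 with len(t) > 0
-- (ZeroDivisionError), and indices i < len(t) other than the wildcard position
-- of t with i ≥ len(p) (IndexError).  (For len(t) = 0 A returns 0 for any q,
-- but so does B; q ≠ 0 is stated unconditionally only for simplicity — it
-- excludes no input on which the two disagree, only q = 0 ∧ t = "" where both
-- Pythons raise or A alone returns 0; see coverage note: A raises on q = 0
-- whenever len(t) > 0.)
def Pre_findWildSum (t : String) (p : String) (q : Int) : Prop :=
  q ≠ 0 ∧ ∀ i, i < t.toList.length →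
    ('?' ∈ t.toList ∧ i = t.toList.idxOf '?') ∨ i < p.toList.length

instance (t : String) (p : String) (q : Int) : Decidable (Pre_findWildSum t p q) := by
  unfold Pre_findWildSum; infer_instance

def pvWitness_findWildSum : String × String × Int := ("AB?D", "XYZW", 97)

def Spec_findWildSum (t : String) (p : String) (q : Int) (out : Int) : Prop := out = findWildSum_alt t p q
instance (t : String) (p : String) (q : Int) (out : Int) : Decidable (Spec_findWildSum t p q out) := by unfold Spec_findWildSum; infer_instance

-- ===== CLAIM (what is proved, stated in full; the proofs are below) =====
def Claim_equal_findWildSum : Prop := ∀ (t : String) (p : String) (q : Int), Dom_findWildSum t p q → Pre_findWildSum t p q → Spec_findWildSum t p q (findWildSum t p q)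

-- ===== LEMMAS AND PROOFS =====

-- q divides a - (a % q)  (floored mod).
lemma pv_mod_sub_dvd (a q : Int) : q ∣ a - PySem.Int.mod a q := by
  refine ⟨PySem.Int.floordiv a q, ?_⟩
  have h := PySem.Int.floordiv_mul_add_mod a q
  linarith

-- congruent arguments give the same floored mod
lemma pv_mod_congr {q : Int} (hq : q ≠ 0) {a b : Int} (h : q ∣ a - b) :
    PySem.Int.mod a q = PySem.Int.mod b q := by
  have hd : q ∣ PySem.Int.mod a q - PySem.Int.mod b q := by
    have ha := pv_mod_sub_dvd a q
    have hb := pv_mod_sub_dvd b q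
    have : PySem.Int.mod a q - PySem.Int.mod b q =
        (a - b) - (a - PySem.Int.mod a q) + (b - PySem.Int.mod b q) := by ring
    rw [this]
    exact dvd_add (dvd_sub h ha) hb
  rcases lt_trichotomy q 0 with hneg | hz | hpos
  · have b1 := PySem.Int.mod_neg_bounds (a := a) hneg
    have b2 := PySem.Int.mod_neg_bounds (a := b) hneg
    have : |PySem.Int.mod a q - PySem.Int.mod b q| < -q := by
      rw [abs_lt]; constructor <;> linarith [b1.1, b1.2, b2.1, b2.2]
    have := Int.eq_zero_of_abs_lt_dvd hd.neg_left this
    omega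
  · exact absurd hz hq
  · have b1l := PySem.Int.mod_nonneg (a := a) hpos
    have b1u := PySem.Int.mod_lt (a := a) hpos
    have b2l := PySem.Int.mod_nonneg (a := b) hpos
    have b2u := PySem.Int.mod_lt (a := b) hpos
    have : |PySem.Int.mod a q - PySem.Int.mod b q| < q := by
      rw [abs_lt]; constructor <;> linarith
    have := Int.eq_zero_of_abs_lt_dvd hd this
    omega

lemma pv_mod_mod {q : Int} (hq : q ≠ 0) (a : Int) :
    PySem.Int.mod (PySem.Int.mod a q) q = PySem.Int.mod a q := by
  exact pv_mod_congr hq (by simpa [neg_sub] using (pv_mod_sub_dvd a q).neg_right)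

lemma pv_mod_mul_add {q : Int} (hq : q ≠ 0) (x c d : Int) :
    PySem.Int.mod (PySem.Int.mod x q * c + d) q = PySem.Int.mod (x * c + d) q := by
  refine pv_mod_congr hq ?_
  have : PySem.Int.mod x q * c + d - (x * c + d) = -((x - PySem.Int.mod x q) * c) := by ring
  rw [this]
  exact ((pv_mod_sub_dvd x q).mul_right c).neg_right

lemma pv_mod_add_mul {q : Int} (hq : q ≠ 0) (a y c : Int) :
    PySem.Int.mod (a + PySem.Int.mod y q * c) q = PySem.Int.mod (a + y * c) q := by
  refine pv_mod_congr hq ?_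
  have : a + PySem.Int.mod y q * c - (a + y * c) = -((y - PySem.Int.mod y q) * c) := by ring
  rw [this]
  exact ((pv_mod_sub_dvd y q).mul_right c).neg_right

lemma pv_mod_arg {q a b : Int} (h : a = b) : PySem.Int.mod a q = PySem.Int.mod b q := by rw [h]

-- position weight: 0 at the wildcard, ord(p[k]) - 64 elsewhere
def wgt (pl : List Char) (j : Option Nat) (k : Nat) : Int :=
  if some k = j then 0 else ((pl.getD k 'A').toNat : Int) - 64

-- back-to-front weighted sum of positions 0 .. n-1 (weight of k is 26^(n-1-k))
def wSum (pl : List Char) (j : Option Nat) : Nat → Int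
  | 0 => 0
  | n + 1 => wgt pl j n + 26 * wSum pl j n

-- the same sum written front-to-back starting at position i
def wSumFrom (pl : List Char) (j : Option Nat) : Nat → Nat → Int
  | _, 0 => 0
  | i, n + 1 => wgt pl j i * 26 ^ n + wSumFrom pl j (i + 1) n

lemma wSumFrom_shift (pl : List Char) (j : Option Nat) :
    ∀ n i, wSumFrom pl j i (n + 1) = 26 * wSumFrom pl j i n + wgt pl j (i + n) := by
  intro n
  induction n with
  | zero => intro i; simp [wSumFrom]
  | succ k ih =>
    intro i
    have h1 : wSumFrom pl j i (k + 2) = wgt pl j i * 26 ^ (k + 1) + wSumFrom pl j (i + 1) (k + 1) := rfl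
    rw [h1, ih (i + 1)]
    have h2 : wSumFrom pl j i (k + 1) = wgt pl j i * 26 ^ k + wSumFrom pl j (i + 1) k := rfl
    rw [h2]
    have : i + 1 + k = i + (k + 1) := by omega
    rw [this]; ring

lemma wSumFrom_zero_eq (pl : List Char) (j : Option Nat) :
    ∀ n, wSumFrom pl j 0 n = wSum pl j n := by
  intro n
  induction n with
  | zero => rfl
  | succ k ih =>
    rw [wSumFrom_shift pl j k 0, ih]
    simp [wSum]; ring

-- A's wildcard scan equals B's
lemma wildcard_eq_aux (pl : List Char) :
    ∀ r i, i + r = pl.length → findWildcardLoop pl pl.length i = wildIdx (pl.drop i) i := by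
  intro r
  induction r with
  | zero =>
    intro i hi
    rw [findWildcardLoop]
    simp only [show ¬ i < pl.length by omega, dite_false]
    rw [List.drop_of_length_le (by omega)]
    rfl
  | succ k ih =>
    intro i hi
    have hlt : i < pl.length := by omega
    rw [findWildcardLoop]
    simp only [hlt, dite_true]
    rw [List.drop_eq_getElem_cons hlt]
    have hg : pl.getD i 'A' = pl[i] := List.getD_eq_getElem pl 'A' hlt
    rw [hg]
    by_cases hc : pl[i] = '?'
    · simp [wildIdx, hc]
    · simp only [hc, if_false, wildIdx]
      exact ih (i + 1) (by omega)

lemma wildcard_eq (pl : List Char) : findWildcard pl = wildIdx pl 0 := by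
  have := wildcard_eq_aux pl pl.length 0 (by omega)
  simpa [findWildcard] using this

-- A's Horner loop computes the weighted sum mod q
lemma sumLoopA_eq (pl : List Char) {q : Int} (hq : q ≠ 0) (j : Option Nat) (m : Nat) :
    ∀ n i s, i + (n + 1) = m →
      sumLoopA pl q j m i s = PySem.Int.mod (s * 26 ^ (n + 1) + wSumFrom pl j i (n + 1)) q := by
  intro n
  induction n with
  | zero =>
    intro i s hi
    have hlt : i < m := by omega
    rw [sumLoopA]
    simp only [hlt, dite_true]
    have hstop : ∀ s', sumLoopA pl q j m (i + 1) s' = s' := by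
      intro s'; rw [sumLoopA]; simp [show ¬ i + 1 < m by omega]
    by_cases hj : some i = j
    · rw [if_pos hj, hstop]
      refine pv_mod_arg ?_
      simp [wSumFrom, wgt, hj]; ring
    · rw [if_neg hj, hstop]
      refine pv_mod_arg ?_
      simp [wSumFrom, wgt, hj, convertStr]; ring
  | succ k ih =>
    intro i s hi
    have hlt : i < m := by omega
    rw [sumLoopA]
    simp only [hlt, dite_true]
    have hrec : ∀ x, sumLoopA pl q j m (i + 1) (PySem.Int.mod x q) =
        PySem.Int.mod (PySem.Int.mod x q * 26 ^ (k + 1) + wSumFrom pl j (i + 1) (k + 1)) q :=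
      fun x => ih (i + 1) (PySem.Int.mod x q) (by omega)
    have hshape : wSumFrom pl j i (k + 2) = wgt pl j i * 26 ^ (k + 1) + wSumFrom pl j (i + 1) (k + 1) := rfl
    by_cases hj : some i = j
    · rw [if_pos hj, hrec, pv_mod_mul_add hq]
      refine pv_mod_arg ?_
      rw [hshape]; simp [wgt, hj]; ring
    · rw [if_neg hj, hrec, pv_mod_mul_add hq]
      refine pv_mod_arg ?_
      rw [hshape]; simp [wgt, hj, convertStr]; ring

-- B's descending loop computes the weighted sum mod q
lemma sumLoopB_eq (pl : List Char) {q : Int} (hq : q ≠ 0) (j : Option Nat) :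
    ∀ n acc pw, (∃ x, acc = PySem.Int.mod x q) →
      sumLoopB pl q j n acc pw = PySem.Int.mod (acc + pw * wSum pl j n) q := by
  intro n
  induction n with
  | zero =>
    rintro acc pw ⟨x, rfl⟩
    simp [sumLoopB, wSum, pv_mod_mod hq]
  | succ k ih =>
    rintro acc pw hacc
    rw [sumLoopB]
    by_cases hj : some k = j
    · rw [if_pos hj, ih acc (PySem.Int.mod (pw * 26) q) hacc, pv_mod_add_mul hq]
      refine pv_mod_arg ?_
      simp [wSum, wgt, hj]; ring
    · rw [if_neg hj]
      set x' : Int := acc + (((pl.getD k 'A').toNat : Int) - 64) * pw with hx'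
      rw [ih (PySem.Int.mod x' q) (PySem.Int.mod (pw * 26) q) ⟨x', rfl⟩, pv_mod_add_mul hq]
      have h1 : PySem.Int.mod (PySem.Int.mod x' q + pw * 26 * wSum pl j k) q =
          PySem.Int.mod (x' + pw * 26 * wSum pl j k) q := by
        have := pv_mod_mul_add hq x' 1 (pw * 26 * wSum pl j k)
        simpa using this
      rw [h1]
      refine pv_mod_arg ?_
      simp [wSum, wgt, hj, hx']; ring

-- ===== VERDICT (by name: the statement is the Claim_ definition above) =====
theorem findWildSum_spec : Claim_equal_findWildSum := by
  intro t p q _hDom hPre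
  obtain ⟨hq, _⟩ := hPre
  unfold Spec_findWildSum findWildSum findWildSum_alt
  rw [wildcard_eq]
  set pl := p.toList
  set j := wildIdx t.toList 0
  cases hm : t.toList.length with
  | zero =>
    simp [sumLoopA, sumLoopB]
  | succ n =>
    rw [sumLoopA_eq pl hq j (n + 1) n 0 0 (by omega),
        sumLoopB_eq pl hq j (n + 1) 0 1 ⟨0, by simp [PySem.Int.mod]⟩,
        wSumFrom_zero_eq]
    refine pv_mod_arg ?_
    ring
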